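-- pv_equiv track=rewrite | github.com/medva1997/bmstu_sem6 | prictik_1sem/PDF/checker.py | analyze_equal
-- ===== SOURCE A (Python) =====
-- def analyze_equal(data):
--
--     dif1 = 0
--     dif2 = 0
--     match = 0
--
--     for x in data:
--         if x[0] == '-':
--             dif1 += 1
--         elif x[0] == '+':
--             dif2 += 1
--         elif x[0] != '?':
--             match += 1
--
--     return dif1, dif2, match
-- ===== SOURCE B (Python) =====
-- def analyze_equal(data):
--     firsts = [x[0] for x in data]
--     dif1 = firsts.count('-')
--     dif2 = firsts.count('+')
--     match = len(firsts) - dif1 - dif2 - firsts.count('?')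
--     return dif1, dif2, match
-- ===== Notes on version B (the rewrite author's own statement) =====
-- stated objective: alternative
-- what changed: Replaces A's single branching loop with three counters by a staged computation: extract the first characters once, then obtain dif1/dif2 by separate list.count passes and match as total minus the '-', '+' and '?' counts, with no per-element branching anywhere.
import Mathlib
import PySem

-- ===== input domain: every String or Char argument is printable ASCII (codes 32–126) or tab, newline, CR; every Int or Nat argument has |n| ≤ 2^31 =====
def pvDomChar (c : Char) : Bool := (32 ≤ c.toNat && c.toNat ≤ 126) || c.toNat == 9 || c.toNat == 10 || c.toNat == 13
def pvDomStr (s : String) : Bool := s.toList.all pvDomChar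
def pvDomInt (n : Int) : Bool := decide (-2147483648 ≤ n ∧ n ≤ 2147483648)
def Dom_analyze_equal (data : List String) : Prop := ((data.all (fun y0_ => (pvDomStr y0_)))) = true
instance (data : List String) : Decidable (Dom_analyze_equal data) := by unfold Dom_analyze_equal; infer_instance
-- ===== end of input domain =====

-- B replaces A's single branching loop by staged passes: collect the first characters
-- once, read dif1/dif2 off by list.count, and compute match as total minus the
-- '-', '+' and '?' counts — no per-element branching.
-- ===== PORT A =====
def analyze_equal (data : List String) : Int × Int × Int :=
  data.foldl (fun (acc : Int × Int × Int) x =>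
    match PySem.Str.pyGet? x 0 with
    | none => acc  -- x[0] raises IndexError in Python; excluded by Pre_
    | some c =>
      if c == '-' then (acc.1 + 1, acc.2.1, acc.2.2)
      else if c == '+' then (acc.1, acc.2.1 + 1, acc.2.2)
      else if c != '?' then (acc.1, acc.2.1, acc.2.2 + 1)
      else acc) (0, 0, 0)

-- ===== PORT B =====
def analyze_equal_alt (data : List String) : Int × Int × Int :=
  let firsts := data.filterMap (fun x => PySem.Str.pyGet? x 0)  -- [x[0] for x in data]; raising case excluded by Pre_
  let dif1 : Int := firsts.count '-'
  let dif2 : Int := firsts.count '+'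
  (dif1, dif2, (firsts.length : Int) - dif1 - dif2 - (firsts.count '?' : Int))

-- ===== PRECONDITION & SPEC =====
-- Pre_ excludes lists containing an empty string, on which A (and B) raise IndexError at x[0].
def Pre_analyze_equal (data : List String) : Prop := (data.all (fun s => !s.toList.isEmpty)) = true
instance (data : List String) : Decidable (Pre_analyze_equal data) := by unfold Pre_analyze_equal; infer_instance
def pvWitness_analyze_equal : List String := ["- a", "+ b", "? c", "same"]
def Spec_analyze_equal (data : List String) (out : Int × Int × Int) : Prop := out = analyze_equal_alt data
instance (data : List String) (out : Int × Int × Int) : Decidable (Spec_analyze_equal data out) := by unfold Spec_analyze_equal; infer_instance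

-- ===== CLAIM (what is proved, stated in full; the proofs are below) =====
def Claim_equal_analyze_equal : Prop := ∀ (data : List String), Dom_analyze_equal data → Pre_analyze_equal data → Spec_analyze_equal data (analyze_equal data)

-- ===== LEMMAS AND PROOFS =====

-- counting characterisation of A's loop body, accumulator generalised
lemma goA_counts (l : List Char) (a b m : Int) :
    l.foldl (fun (acc : Int × Int × Int) c =>
      if c == '-' then (acc.1 + 1, acc.2.1, acc.2.2)
      else if c == '+' then (acc.1, acc.2.1 + 1, acc.2.2)
      else if c != '?' then (acc.1, acc.2.1, acc.2.2 + 1)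
      else acc) (a, b, m)
    = (a + l.count '-', b + l.count '+',
       m + l.countP (fun c => !(c == '-') && !(c == '+') && c != '?')) := by
  induction l generalizing a b m with
  | nil => simp
  | cons c l ih =>
    rw [List.foldl_cons]
    by_cases h1 : c = '-'
    · subst h1
      rw [show (if ('-' == '-') = true then ((a:Int) + 1, b, m)
          else if ('-' == '+') = true then (a, b + 1, m)
          else if ('-' != '?') = true then (a, b, m + 1) else (a, b, m)) = (a + 1, b, m) from rfl,
        ih]
      simp [List.count_cons, List.countP_cons]
      omega
    · by_cases h2 : c = '+'
      · subst h2
        rw [show (if ('+' == '-') = true then ((a:Int) + 1, b, m)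
            else if ('+' == '+') = true then (a, b + 1, m)
            else if ('+' != '?') = true then (a, b, m + 1) else (a, b, m)) = (a, b + 1, m) from rfl,
          ih]
        simp [List.count_cons, List.countP_cons]
        omega
      · by_cases h3 : c = '?'
        · subst h3
          rw [show (if ('?' == '-') = true then ((a:Int) + 1, b, m)
              else if ('?' == '+') = true then (a, b + 1, m)
              else if ('?' != '?') = true then (a, b, m + 1) else (a, b, m)) = (a, b, m) from rfl,
            ih]
          simp [List.count_cons, List.countP_cons, h1, h2]
        · have hstep : (if (c == '-') = true then ((a:Int) + 1, b, m)
              else if (c == '+') = true then (a, b + 1, m)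
              else if (c != '?') = true then (a, b, m + 1) else (a, b, m)) = (a, b, m + 1) := by
            simp [h1, h2, h3]
          rw [hstep, ih]
          simp [List.count_cons, List.countP_cons, h1, h2, h3]
          omega

lemma pre_head (x : String) (xs : List String) (h : Pre_analyze_equal (x :: xs)) :
    (∃ c cs, x.toList = c :: cs) ∧ Pre_analyze_equal xs := by
  have h' := h
  unfold Pre_analyze_equal at h' ⊢
  simp only [List.all_cons, Bool.and_eq_true] at h'
  refine ⟨?_, h'.2⟩
  cases hl : x.toList with
  | nil => exfalso; rw [hl] at h'; simp at h'
  | cons c cs => exact ⟨c, cs, rfl⟩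

lemma first_some (x : String) (c : Char) (cs : List Char) (hl : x.toList = c :: cs) :
    PySem.Str.pyGet? x 0 = some c := by
  simp [PySem.Str.pyGet?, PySem.Chars.pyGet?, hl, PySem.List.pyGet?, PySem.List.pyIdx?]

-- under Pre_, every first character exists, so A's fold is the char fold over firsts
lemma A_eq_fold_firsts (data : List String) (h : Pre_analyze_equal data) (acc : Int × Int × Int) :
    data.foldl (fun (acc : Int × Int × Int) x =>
      match PySem.Str.pyGet? x 0 with
      | none => acc
      | some c =>
        if c == '-' then (acc.1 + 1, acc.2.1, acc.2.2)
        else if c == '+' then (acc.1, acc.2.1 + 1, acc.2.2)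
        else if c != '?' then (acc.1, acc.2.1, acc.2.2 + 1)
        else acc) acc
    = (data.filterMap (fun x => PySem.Str.pyGet? x 0)).foldl (fun (acc : Int × Int × Int) c =>
        if c == '-' then (acc.1 + 1, acc.2.1, acc.2.2)
        else if c == '+' then (acc.1, acc.2.1 + 1, acc.2.2)
        else if c != '?' then (acc.1, acc.2.1, acc.2.2 + 1)
        else acc) acc := by
  induction data generalizing acc with
  | nil => rfl
  | cons x xs ih =>
    obtain ⟨⟨c, cs, hl⟩, hxs⟩ := pre_head x xs h
    have hs := first_some x c cs hl
    rw [List.foldl_cons, List.filterMap_cons, hs, List.foldl_cons]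
    exact ih hxs _

lemma length_split (l : List Char) :
    l.length = l.count '-' + l.count '+' + l.count '?'
      + l.countP (fun c => !(c == '-') && !(c == '+') && c != '?') := by
  induction l with
  | nil => rfl
  | cons c l ih =>
    by_cases h1 : c = '-'
    · subst h1; simp [List.count_cons, List.countP_cons, ih]; omega
    · by_cases h2 : c = '+'
      · subst h2; simp [List.count_cons, List.countP_cons, ih]; omega
      · by_cases h3 : c = '?'
        · subst h3; simp [List.count_cons, List.countP_cons, ih, h1, h2]; omega
        · simp [List.count_cons, List.countP_cons, ih, h1, h2, h3]; omega

-- ===== VERDICT (by name: the statement is the Claim_ definition above) =====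
theorem analyze_equal_spec : Claim_equal_analyze_equal := by
  intro data _ hpre
  unfold Spec_analyze_equal analyze_equal analyze_equal_alt
  rw [A_eq_fold_firsts data hpre, goA_counts]
  have hsplit := length_split (data.filterMap (fun x => PySem.Str.pyGet? x 0))
  refine Prod.ext (by simp) (Prod.ext (by simp) ?_)
  simp only []
  push_cast [hsplit]
  ring
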